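-- pv_equiv track=rewrite | github.com/fernandoggf/bioinf_biopy | biobasic.py | single_cds_find
-- ===== SOURCE A (Python) =====
-- def single_cds_find(aa_seq: str):
--     temp_cds = []
--     cds = []
--     for aa in aa_seq:
--         if aa == '*':
--             if temp_cds:
--                 cds.append(temp_cds)
--                 temp_cds = []
--         else:
--             if aa == 'M':
--                 temp_cds.append('')
--             for i in range(len(temp_cds)):
--                 temp_cds[i] += aa
--     return cds
-- ===== SOURCE B (Python) =====
-- def single_cds_find(aa_seq: str):
--     cds = []
--     segs = aa_seq.split('*')
--     for seg in segs[:-1]: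
--         group = [seg[i:] for i, aa in enumerate(seg) if aa == 'M']
--         if group:
--             cds.append(group)
--     return cds
-- ===== Notes on version B (the rewrite author's own statement) =====
-- stated objective: faster
-- what changed: Instead of growing every open ORF string character by character inside the scan, B splits the sequence on the stop separator once and emits each ORF as a single slice from each start position to the segment end.
import Mathlib
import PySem

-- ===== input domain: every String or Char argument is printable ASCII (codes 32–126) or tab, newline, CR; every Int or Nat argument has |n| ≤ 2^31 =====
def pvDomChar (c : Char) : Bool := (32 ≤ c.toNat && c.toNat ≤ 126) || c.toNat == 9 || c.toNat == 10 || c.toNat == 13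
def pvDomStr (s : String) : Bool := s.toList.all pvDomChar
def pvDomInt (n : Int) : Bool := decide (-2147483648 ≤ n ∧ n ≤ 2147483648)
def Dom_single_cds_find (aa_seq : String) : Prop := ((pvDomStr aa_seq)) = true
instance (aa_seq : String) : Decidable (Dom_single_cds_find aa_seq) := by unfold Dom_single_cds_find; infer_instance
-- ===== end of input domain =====

-- B replaces A's per-character growth of every open ORF string with one split on '*'
-- plus a direct slice from each 'M' to the segment end (objective: faster, constant-factor).
-- Both ports represent Python strings as List Char during the computation (exact) and
-- convert with String.mk at the end.

-- ===== PORT A =====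
-- one iteration of A's loop body: state = (temp_cds, cds)
def pvStepA (st : List (List Char) × List (List (List Char))) (aa : Char) :
    List (List Char) × List (List (List Char)) :=
  if aa = '*' then
    if st.1 ≠ [] then ([], st.2 ++ [st.1]) else st
  else
    let t := if aa = 'M' then st.1 ++ [[]] else st.1
    (t.map (fun s => s ++ [aa]), st.2)

def single_cds_find (aa_seq : String) : List (List String) :=
  ((aa_seq.toList.foldl pvStepA ([], [])).2).map (List.map String.mk)

-- ===== PORT B =====
-- exact port of str.split('*') (single-character separator): n stars give n+1 pieces,
-- empty pieces kept
def pvSplit : List Char → List (List Char)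
  | [] => [[]]
  | c :: r =>
    if c = '*' then [] :: pvSplit r
    else
      match pvSplit r with
      | [] => [[c]]      -- unreachable: pvSplit is never []
      | s :: ss => (c :: s) :: ss

-- [seg[i:] for i, aa in enumerate(seg) if aa == 'M']
def pvGroup (seg : List Char) : List (List Char) :=
  (PySem.List.enumerate seg).filterMap
    (fun p => if p.2 = 'M' then some (PySem.List.slice seg (some p.1) none) else none)

def single_cds_find_alt (aa_seq : String) : List (List String) :=
  ((pvSplit aa_seq.toList).dropLast.foldl
      (fun cds seg =>
        let group := pvGroup seg
        if group ≠ [] then cds ++ [group] else cds)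
      []).map (List.map String.mk)

-- ===== PRECONDITION & SPEC =====
def Spec_single_cds_find (aa_seq : String) (out : List (List String)) : Prop := out = single_cds_find_alt aa_seq
instance (aa_seq : String) (out : List (List String)) : Decidable (Spec_single_cds_find aa_seq out) := by unfold Spec_single_cds_find; infer_instance

-- ===== CLAIM (what is proved, stated in full; the proofs are below) =====
def Claim_equal_single_cds_find : Prop := ∀ (aa_seq : String), Dom_single_cds_find aa_seq → Spec_single_cds_find aa_seq (single_cds_find aa_seq)

-- ===== LEMMAS AND PROOFS =====

-- suffixes of seg starting at each 'M', in order
def gsuf : List Char → List (List Char)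
  | [] => []
  | c :: r => if c = 'M' then (c :: r) :: gsuf r else gsuf r

-- what A's loop emits from state t on the rest of the input
def mid (t : List (List Char)) : List Char → List (List (List Char))
  | [] => []
  | c :: r =>
    if c = '*' then (if t = [] then [] else [t]) ++ mid [] r
    else mid ((if c = 'M' then t ++ [[]] else t).map (fun s => s ++ [c])) r

-- B's emissions over a segment list (last segment dropped)
def bsegs : List (List Char) → List (List (List Char))
  | [] => []
  | [_] => []
  | seg :: r :: rest => (if gsuf seg = [] then [] else [gsuf seg]) ++ bsegs (r :: rest)

def pvFull (t : List (List Char)) (seg : List Char) : List (List Char) :=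
  t.map (fun s => s ++ seg) ++ gsuf seg

-- like bsegs but the first segment's group also carries the inherited open ORFs t
def extraSegs (t : List (List Char)) : List (List Char) → List (List (List Char))
  | [] => []
  | [_] => []
  | seg :: r :: rest => (if pvFull t seg = [] then [] else [pvFull t seg]) ++ bsegs (r :: rest)

theorem foldA_snd (l : List Char) : ∀ (t : List (List Char)) (acc : List (List (List Char))),
    (l.foldl pvStepA (t, acc)).2 = acc ++ mid t l := by
  induction l with
  | nil => intro t acc; simp [mid]
  | cons c r ih =>
    intro t acc
    by_cases hc : c = '*'
    · subst hc
      by_cases ht : t = []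
      · subst ht; simp [pvStepA, mid, ih]
      · simp [pvStepA, ht, mid, ih]
    · simp [pvStepA, hc, mid, ih]

theorem pvSplit_ne_nil (l : List Char) : pvSplit l ≠ [] := by
  cases l with
  | nil => simp [pvSplit]
  | cons c r =>
    by_cases hc : c = '*'
    · simp [pvSplit, hc]
    · simp only [pvSplit, hc]
      cases pvSplit r <;> simp

theorem extraSegs_nil_left (segs : List (List Char)) : extraSegs [] segs = bsegs segs := by
  match segs with
  | [] => rfl
  | [_] => rfl
  | seg :: r :: rest => simp [extraSegs, bsegs, pvFull]

theorem pvFull_step (t : List (List Char)) (c : Char) (s : List Char) :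
    pvFull t (c :: s) = pvFull ((if c = 'M' then t ++ [[]] else t).map (fun x => x ++ [c])) s := by
  by_cases hc : c = 'M' <;>
    simp [pvFull, gsuf, hc, List.map_map, Function.comp]

theorem mid_eq_extraSegs (l : List Char) : ∀ t, mid t l = extraSegs t (pvSplit l) := by
  induction l with
  | nil => intro t; simp [mid, pvSplit, extraSegs]
  | cons c r ih =>
    intro t
    by_cases hc : c = '*'
    · subst hc
      have hr := pvSplit_ne_nil r
      simp only [mid, pvSplit, ih]
      rw [extraSegs_nil_left]
      cases hs : pvSplit r with
      | nil => exact absurd hs hr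
      | cons s ss =>
        have : pvFull t [] = t := by simp [pvFull, gsuf]
        simp [extraSegs, this]
    · have hr := pvSplit_ne_nil r
      simp only [mid, hc, ih]
      cases hs : pvSplit r with
      | nil => exact absurd hs hr
      | cons s ss =>
        simp only [pvSplit, if_neg hc, hs]
        cases ss with
        | nil => rfl
        | cons s2 ss2 => simp [extraSegs, pvFull_step]

theorem foldB_eq_bsegs (segs : List (List Char))
    (acc : List (List (List Char))) :
    segs.dropLast.foldl
      (fun cds seg => if gsuf seg ≠ [] then cds ++ [gsuf seg] else cds) acc
      = acc ++ bsegs segs := by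
  induction segs generalizing acc with
  | nil => simp [bsegs]
  | cons seg rest ih =>
    cases rest with
    | nil => simp [bsegs]
    | cons r rest2 =>
      simp only [List.dropLast_cons₂, List.foldl_cons, ih, bsegs]
      by_cases h : gsuf seg = [] <;> simp [h]

theorem pvGroup_aux (seg : List Char) : ∀ (k : Nat) (seg0 : List Char), seg0.drop k = seg →
    ((PySem.List.enumerate seg (k : Int)).filterMap
      (fun p => if p.2 = 'M' then some (PySem.List.slice seg0 (some p.1) none) else none))
      = gsuf seg := by
  induction seg with
  | nil => intro k seg0 _; simp [PySem.List.enumerate_nil, gsuf]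
  | cons c r ih =>
    intro k seg0 h
    have hk : k < seg0.length := by
      by_contra hk
      rw [List.drop_eq_nil_of_le (Nat.le_of_not_lt hk)] at h
      exact (List.cons_ne_nil c r) h.symm
    have hdrop : seg0.drop (k + 1) = r := by
      have := congrArg List.tail h
      simpa [List.tail_drop] using this
    have hslice : PySem.List.slice seg0 (some ((k : Int))) none = c :: r := by
      rw [PySem.List.slice_from_natCast]
      exact h
    have hrec := ih (k + 1) seg0 hdrop
    by_cases hc : c = 'M'
    · simp only [PySem.List.enumerate_cons, List.filterMap_cons, hc, gsuf]
      rw [hslice]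
      have : ((k : Int) + 1) = ((k + 1 : Nat) : Int) := by push_cast; ring
      rw [this, hrec]
      simp [hc]
    · simp only [PySem.List.enumerate_cons, List.filterMap_cons, hc, gsuf]
      have : ((k : Int) + 1) = ((k + 1 : Nat) : Int) := by push_cast; ring
      rw [this, hrec]
      simp

theorem pvGroup_eq_gsuf (seg : List Char) : pvGroup seg = gsuf seg := by
  have := pvGroup_aux seg 0 seg (by simp)
  simpa [pvGroup] using this

-- ===== VERDICT (by name: the statement is the Claim_ definition above) =====
theorem single_cds_find_spec : Claim_equal_single_cds_find := by
  intro aa_seq _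
  unfold Spec_single_cds_find single_cds_find single_cds_find_alt
  congr 1
  rw [foldA_snd, List.nil_append, mid_eq_extraSegs, extraSegs_nil_left]
  simp only [pvGroup_eq_gsuf]
  rw [foldB_eq_bsegs, List.nil_append]
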